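/-
  EXAMPLES for Asan/Objects.lean, Asan/Stack.lean, Asan/Runtime.lean: how a proof of an instrumented function uses the shadow layer.

      1. a field access inside a stack object of a protected frame passes its check after the prologue
           (`decode_all`'s `error`; a field of `stb_vorbis_open_memory`'s `p`), and the layer is restored by the epilogue
      2. an access inside an arena block passes after `arena_unpoison`; after `arena_poison` of the block the layer is as before
      3. an access inside a registered global passes after `__asan_register_globals`
      4. the start state: `ShadowInv [IN, OUT] [] 800000H`, a check of an input byte, and the state after `run_ctors` for the
         generated table of this image
  Nothing here is used by the proof.
-/
import Asan.Runtime
import Vorbis.Frames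
import Vorbis.Globals
import Vorbis.Symbols
import Vorbis.StartShadow
namespace Asan.Test
open X86 X86.User Asan Vorbis

/-! ### 1. A protected frame -/

/-- `decode_all` was entered with the stack pointer `ra` (pointing at its return address), so the caller's `top` is `ra + 8`; its
frame is at `base = ra − 184`, the body runs with `rsp = ra − 232 ≤ base`. After the prologue's four stores the 4-byte check of
`error` (base + 32) passes. -/
example (others : List Obj) (frames : List (Nat × FrameLayout)) (ra : Nat) (mem : Mem)
    (h : ShadowInv others frames (ra + 8) mem) (hra : ra % 16 = 8) (hlo : 0x700000 + 232 ≤ ra) :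
    AccessibleSmall (storesMem mem ((ra - 184) / 8) Frames.decode_all.prologue) (ra - 184 + 32) 4 := by
  have hinv : ShadowInv others ((ra - 184, Frames.decode_all) :: frames) (ra - 232)
      (storesMem mem ((ra - 184) / 8) Frames.decode_all.prologue) := by
    refine h.prologue Frames.decode_all_ok (by omega) ?_ (by omega) (by omega) (by omega)
    show ra - 184 + 128 ≤ ra + 8
    omega
  have hobj : (⟨ra - 184 + 32, 4, .stack⟩ : Obj) ∈ Frames.decode_all.objsAt (ra - 184) := by
    unfold FrameLayout.objsAt Frames.decode_all
    simp only [List.map_cons, List.mem_cons, true_or]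
  have hcov := hinv.obj_frame List.mem_cons_self hobj
  exact Obj.accSmall_of_obj hcov (Nat.le_refl _) (Nat.le_refl _) (by omega)

/-- The same frame: the 16-byte check (`__asan_load16_noabort`) of `a` (base + 96, 16 bytes) passes, and one byte more does not fit
the object — the lemma cannot be applied, which is the point of justifying object-level. -/
example (others : List Obj) (frames : List (Nat × FrameLayout)) (base top : Nat) (mem : Mem)
    (h : ShadowInv others ((base, Frames.decode_all) :: frames) top mem) : Accessible mem (base + 96) 16 := by
  have hobj : (⟨base + 96, 16, .stack⟩ : Obj) ∈ Frames.decode_all.objsAt base := by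
    unfold FrameLayout.objsAt Frames.decode_all
    simp only [List.map_cons, List.mem_cons, true_or, or_true]
  exact Obj.acc_of_obj (h.obj_frame List.mem_cons_self hobj) (Nat.le_refl _) (Nat.le_refl _) (by omega)

/-- A field of the `stb_vorbis` that `stb_vorbis_open_memory` builds in its frame (`p` at base + 48, 1808 bytes): the 8-byte load of
`p.alloc.alloc_buffer` (offset 70H) that `setup_malloc(&p, …)` checks — the frame is a CALLER's, found anywhere in `frames`. -/
example (others : List Obj) (frames : List (Nat × FrameLayout)) (base top : Nat) (mem : Mem)
    (h : ShadowInv others frames top mem) (hF : (base, Frames.stb_vorbis_open_memory) ∈ frames) :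
    AccessibleSmall mem (base + 48 + 0x70) 8 := by
  have hobj : (⟨base + 48, 1808, .stack⟩ : Obj) ∈ Frames.stb_vorbis_open_memory.objsAt base := by
    unfold FrameLayout.objsAt Frames.stb_vorbis_open_memory
    simp only [List.map_cons, List.mem_cons, true_or]
  have hcov := h.obj_frame hF hobj
  exact Obj.accSmall_of_obj hcov (by show base + 48 ≤ base + 48 + 0x70; omega) (by show base + 48 + 0x70 + 8 ≤ base + 48 + 1808; omega)
    (by omega)

/-- After the epilogue's two stores `decode_all`'s objects are dead and the layer is what it was at entry, for whatever `others'`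
the body left: the clause `ShadowInv others' frames v.rsp v.mem` of its postcondition (`v.rsp = ra + 8`). -/
example (others' : List Obj) (frames : List (Nat × FrameLayout)) (ra : Nat) (mem : Mem)
    (h : ShadowInv others' ((ra - 184, Frames.decode_all) :: frames) (ra - 232) mem) (hra : ra % 16 = 8)
    (hlo : 0x700000 + 232 ≤ ra) (hhi : ra + 8 ≤ 0x800000) (hfr : ∀ bF, bF ∈ frames → ra + 8 ≤ bF.1) :
    ShadowInv others' frames (ra + 8) (storesMem mem ((ra - 184) / 8) Frames.decode_all.epilogue) := by
  refine h.epilogue (by omega) (by omega) hhi ?_ hfr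
  show ra - 184 + 128 ≤ ra + 8
  omega

/-- The same two steps in terms of the entry stack pointer only (`prologue_ra`, `epilogue_ra`), for any of the nine frames. -/
example (others : List Obj) (frames : List (Nat × FrameLayout)) (ra : Nat) (mem : Mem) (F : FrameLayout) (hF : F ∈ Frames.all)
    (h : ShadowInv others frames (ra + 8) mem) (hra : ra % 16 = 8) (hlo : 0x700000 + F.raOff ≤ ra) :
    ShadowInv others ((ra - F.raOff, F) :: frames) (ra - F.raOff) (storesMem mem ((ra - F.raOff) / 8) F.prologue) := by
  have hok := Frames.all_ok F hF
  have hok' := hok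
  obtain ⟨_, _, _, _, _, _, _, _, hr8, _⟩ := hok'
  exact h.prologue_ra hok (by omega) (Nat.le_refl _) (by omega) (by omega)

/-! ### 2. An arena block -/

/-- `setup_malloc` returned `p` after `arena_unpoison(p, n)`: the 4-byte store at `p + 4 k` passes for `4 k + 4 ≤ n`. -/
example (others : List Obj) (frames : List (Nat × FrameLayout)) (top : Nat) (mem : Mem) (h : ShadowInv others frames top mem)
    (p n k : Nat) (h8 : p % 8 = 0) (hlo : 0x800000 ≤ p) (hhi : p + n ≤ 0xC00000)
    (hdisj : ∀ o', o' ∈ others → GranDisj ⟨p, n, .setup⟩ o') (hk : 4 * k + 4 ≤ n) :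
    ShadowInv (⟨p, n, .setup⟩ :: others) frames top (unpoisonMem mem p n) ∧
      AccessibleSmall (unpoisonMem mem p n) (p + 4 * k) 4 := by
  have hinv := h.unpoison ⟨p, n, .setup⟩ h8 (by show 0x100000 ≤ p; omega) hhi (Or.inr hlo) hdisj
  refine ⟨hinv, ?_⟩
  have hcov := hinv.obj_other (o := ⟨p, n, .setup⟩) List.mem_cons_self
  exact Obj.accSmall_of_obj hcov (by show p ≤ p + 4 * k; omega) (by show p + 4 * k + 4 ≤ p + n; omega) (by omega)

/-- `setup_temp_free(p, n)` poisons the top temp block `[p, p + r8 n)`: the other objects stay live. -/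
example (others : List Obj) (frames : List (Nat × FrameLayout)) (top : Nat) (mem : Mem) (p n : Nat)
    (h : ShadowInv (⟨p, n, .temp⟩ :: others) frames top mem) (h8 : p % 8 = 0) (hlo : 0x800000 ≤ p)
    (hhi : p + (n + 7) / 8 * 8 ≤ 0xC00000) :
    ShadowInv others frames top (poisonMem mem p ((n + 7) / 8 * 8)) := by
  refine h.poison p ((n + 7) / 8 * 8) h8 (by omega) (by omega) (Or.inr hlo) (List.sublist_cons_self _ _) ?_
  intro o ho
  have hd := (List.pairwise_cons.mp (List.pairwise_append.mp h.shadow.disjoint).2.1).1 o ho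
  unfold GranDisj Obj.gLo Obj.gHi at hd
  simp only at hd
  unfold Obj.gLo Obj.gHi
  omega

/-! ### 3. A registered global -/

/-- After `__asan_register_globals` with this image's table, the 1-byte load of `log2_4[i]` (`ilog`) passes for `i < 16` — and for
`i = 16` the lemma has nothing to offer: the byte is in no object (it is in the global's red zone, F9H). -/
example (objs : List Obj) (mem : Mem) (h : ShadowOK objs mem)
    (hclean : ∀ d, d ∈ Globals.descs → Clean mem d.beg (d.beg + d.sizeRz))
    (hoff : ∀ d, d ∈ Globals.descs → ∀ o, o ∈ objs → d.Off o) (i : Nat) (hi : i < 16) :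
    AccessibleSmall (registerMem mem Globals.descs) (Globals.log2_4.beg + i) 1 := by
  have hreg := h.register Globals.descs Globals.descs_ok hclean Globals.descs_apart hoff
  have hmem : Globals.log2_4.obj ∈ (Globals.descs.map GlobalDesc.obj).reverse ++ objs := by
    apply List.mem_append_left
    rw [List.mem_reverse]
    apply List.mem_map.mpr
    exact ⟨Globals.log2_4, by decide, rfl⟩
  exact hreg.accSmall hmem (by show Globals.log2_4.beg ≤ Globals.log2_4.beg + i; omega)
    (by show Globals.log2_4.beg + i + 1 ≤ Globals.log2_4.beg + 16; omega) (by omega)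

/-- The red zone behind `log2_4` is poisoned: the byte `log2_4[16]` does NOT pass (tightness; no proof uses it). -/
example (mem : Mem) : ¬ ByteOK (registerOne mem Globals.log2_4) (Globals.log2_4.beg + 16) := by
  apply (registerOne_poisoned mem Globals.log2_4 (by decide)).not_byteOK
  · decide
  · decide

/-! ### 4. The start state -/

/-- At the start the check of input byte `i < len` passes (`get8`), by the object IN — not by "the shadow says so". -/
example (im : Image) (him : im.OK) (c : Nat) (hc : c = 0 ∨ c = 3) (inp : List UInt8) (hlen : inp.length ≤ 0x1FF000)
    (i : Nat) (hi : i < inp.length) : AccessibleSmall (startU im c inp).mem (0x200000 + i) 1 := by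
  have h := start_shadowInv im him c hc inp hlen
  have hcov := h.obj_other (o := objIN inp.length) (by unfold initialObjs; exact List.mem_cons_self)
  exact Obj.accSmall_of_obj hcov (by show 0x200000 ≤ 0x200000 + i; omega)
    (by show 0x200000 + i + 1 ≤ 0x200000 + inp.length; omega) (by omega)

/-- The state after `run_ctors`, for the image of this build: M5's `Image` from the generated symbols, the generated descriptor
table, and a memory with the shadow that `runCtorsSpec` promises. The six globals, IN and OUT are the live objects. -/
example (bytes : Array UInt8) (him : (symbols.image bytes).OK) (c : Nat) (hc : c = 0 ∨ c = 3) (inp : List UInt8)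
    (hlen : inp.length ≤ 0x1FF000) (mem' : Mem)
    (he : Mem.EqOn 0xC00000 0xE00000 (registerMem (startU (symbols.image bytes) c inp).mem Globals.descs) mem') :
    ShadowInv (Globals.objs ++ initialObjs inp.length) [] 0x800000 mem' := by
  refine registered_shadowInv (symbols.image bytes) him c hc inp hlen Globals.descs Globals.descs_ok ?_ Globals.descs_apart mem' he
  show ∀ d, d ∈ Globals.descs → d.beg + d.sizeRz ≤ (symbols.image_end + 7) / 8 * 8
  decide

/-- The record the runtime's contracts are stated over, for this build. -/
example : Runtime := Globals.runtime symbols.rt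

/-- `mem64[__init_array_start] = _sub_I_65535_1` is what the generated tables say (the fact `CtorIn` asks of the memory). -/
example : Globals.initArray = [(symbols.init_array_start, symbols.sub_I_65535_1)] := by decide

end Asan.Test
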